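-- pv_equiv track=rewrite | github.com/vikas-kmr1/LeetCode | Print first n Fibonacci Numbers - GFG/print-first-n-fibonacci-numbers.py | printFibb
-- ===== SOURCE A (Python) =====
-- def printFibb(n):
--     first,second = 0,1
--     ans=[]
--
--     while n > 0:
--         ans.append(second)
--         first, second = second, first + second
--
--         n -= 1
--     return ans
-- ===== SOURCE B (Python) =====
-- def printFibb(n):
--     # Fast-doubling: fd(k) returns (F(k), F(k+1)) using
--     # F(2m) = F(m)*(2F(m+1)-F(m)), F(2m+1) = F(m)^2 + F(m+1)^2.
--     def fd(k):
--         if k == 0: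
--             return (0, 1)
--         a, b = fd(k >> 1)
--         c = a * (2 * b - a)
--         d = a * a + b * b
--         if k & 1:
--             return (d, c + d)
--         return (c, d)
--     return [fd(k)[0] for k in range(1, n + 1)]
-- ===== Notes on version B (the rewrite author's own statement) =====
-- stated objective: alternative
-- what changed: B computes each Fibonacci number independently by the fast-doubling identities (F(2m)=F(m)(2F(m+1)-F(m)), F(2m+1)=F(m)^2+F(m+1)^2) via recursion on the halved index, instead of A's single while-loop over two rolling scalars.
import Mathlib
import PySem

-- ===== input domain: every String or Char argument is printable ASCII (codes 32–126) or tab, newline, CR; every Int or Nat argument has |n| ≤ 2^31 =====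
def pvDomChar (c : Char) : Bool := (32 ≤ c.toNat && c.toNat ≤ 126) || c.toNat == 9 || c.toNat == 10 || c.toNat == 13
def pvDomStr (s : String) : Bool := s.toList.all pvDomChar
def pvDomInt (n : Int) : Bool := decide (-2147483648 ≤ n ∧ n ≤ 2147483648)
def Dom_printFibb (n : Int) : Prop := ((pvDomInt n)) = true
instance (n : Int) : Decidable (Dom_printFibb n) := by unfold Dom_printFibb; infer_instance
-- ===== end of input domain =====

-- B replaces A's rolling-scalar while-loop by the fast-doubling algorithm, computing each
-- term independently from the halved index; same return value, no speed claim.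

-- ===== PORT A =====
-- while n > 0: ans.append(second); first, second = second, first + second; n -= 1
def printFibbLoop : Nat → Int → Int → List Int → List Int
  | 0, _, _, ans => ans
  | Nat.succ k, first, second, ans => printFibbLoop k second (first + second) (ans ++ [second])

def printFibb (n : Int) : List Int := printFibbLoop n.toNat 0 1 []

-- ===== PORT B =====
-- fd(k): fast doubling, returns (F(k), F(k+1)). fd is only ever called on the nonnegative
-- ints of range(1, n+1) (and their halvings), where k >> 1 = k / 2 and k & 1 = k % 2, so
-- the port takes the index as a Nat (via .toNat at the call site).
def fdN : Nat → Int × Int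
  | 0 => (0, 1)
  | k + 1 =>
    let p := fdN ((k + 1) / 2)
    let a := p.1
    let b := p.2
    let c := a * (2 * b - a)
    let d := a * a + b * b
    if (k + 1) % 2 = 1 then (d, c + d) else (c, d)
decreasing_by exact Nat.div_lt_self (Nat.succ_pos k) (by norm_num)

-- [fd(k)[0] for k in range(1, n + 1)]
def printFibb_alt (n : Int) : List Int :=
  (PySem.List.pyRange 1 (n + 1) 1).map (fun k => (fdN k.toNat).1)

-- ===== PRECONDITION & SPEC =====
def Spec_printFibb (n : Int) (out : List Int) : Prop := out = printFibb_alt n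
instance (n : Int) (out : List Int) : Decidable (Spec_printFibb n out) := by unfold Spec_printFibb; infer_instance

-- ===== CLAIM (what is proved, stated in full; the proofs are below) =====
def Claim_equal_printFibb : Prop := ∀ (n : Int), Dom_printFibb n → Spec_printFibb n (printFibb n)

-- ===== LEMMAS AND PROOFS =====

-- fast doubling is correct: fdN k = (F(k), F(k+1))
theorem fdN_eq (k : Nat) : fdN k = ((Nat.fib k : Int), (Nat.fib (k + 1) : Int)) := by
  induction k using Nat.strong_induction_on with
  | _ k ih =>
    match k with
    | 0 => simp [fdN]
    | k + 1 =>
      rw [fdN]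
      rw [ih ((k + 1) / 2) (Nat.div_lt_self (Nat.succ_pos k) (by norm_num))]
      set m := (k + 1) / 2 with hm
      have hle : Nat.fib m ≤ 2 * Nat.fib (m + 1) :=
        le_trans Nat.fib_le_fib_succ (by omega)
      have hc : ((Nat.fib (2 * m) : Nat) : Int)
          = (Nat.fib m : Int) * (2 * (Nat.fib (m + 1) : Int) - (Nat.fib m : Int)) := by
        rw [Nat.fib_two_mul m]; push_cast [Nat.cast_sub hle]; ring
      have hd : ((Nat.fib (2 * m + 1) : Nat) : Int)
          = (Nat.fib m : Int) * (Nat.fib m : Int)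
            + (Nat.fib (m + 1) : Int) * (Nat.fib (m + 1) : Int) := by
        rw [Nat.fib_two_mul_add_one m]; push_cast; ring
      by_cases hpar : (k + 1) % 2 = 1
      · have h2m : k + 1 = 2 * m + 1 := by omega
        simp only [hpar, if_true]
        have hsum : ((Nat.fib (2 * m + 2) : Nat) : Int)
            = ((Nat.fib (2 * m) : Nat) : Int) + ((Nat.fib (2 * m + 1) : Nat) : Int) := by
          rw [Nat.fib_add_two]; push_cast; ring
        rw [h2m]
        refine Prod.ext ?_ ?_
        · simpa using hd.symm
        · show _ = ((Nat.fib (2 * m + 1 + 1) : Nat) : Int)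
          rw [show 2 * m + 1 + 1 = 2 * m + 2 from rfl, hsum, hc, hd]
      · have h2m : k + 1 = 2 * m := by omega
        rw [if_neg hpar, h2m]
        refine Prod.ext ?_ ?_
        · simpa using hc.symm
        · simpa using hd.symm

-- the list appended by A's loop after k iterations starting from (a, b)
def seqF : Nat → Int → Int → List Int
  | 0, _, _ => []
  | k + 1, a, b => b :: seqF k b (a + b)

theorem printFibbLoop_eq (k : Nat) : ∀ (a b : Int) (acc : List Int),
    printFibbLoop k a b acc = acc ++ seqF k a b := by
  induction k with
  | zero => intro a b acc; simp [printFibbLoop, seqF]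
  | succ k ih => intro a b acc; simp [printFibbLoop, seqF, ih]

-- A's loop seeded at (F(m), F(m+1)) lists F(m+1), …, F(m+k)
theorem seqF_fib (k : Nat) : ∀ (m : Nat),
    seqF k (Nat.fib m : Int) (Nat.fib (m + 1) : Int)
      = (List.range k).map (fun i => (Nat.fib (m + 1 + i) : Int)) := by
  induction k with
  | zero => intro m; simp [seqF]
  | succ k ih =>
    intro m
    have hadd : (Nat.fib m : Int) + (Nat.fib (m + 1) : Int) = (Nat.fib (m + 2) : Int) := by
      rw [Nat.fib_add_two]; push_cast; ring
    simp only [seqF, hadd, ih (m + 1), List.range_succ_eq_map, List.map_cons, List.map_map]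
    refine congrArg₂ _ (by norm_num) ?_
    refine List.map_congr_left fun i _ => ?_
    simp only [Function.comp]
    congr 2
    omega

-- ===== VERDICT (by name: the statement is the Claim_ definition above) =====
theorem printFibb_spec : Claim_equal_printFibb := by
  unfold Claim_equal_printFibb Spec_printFibb
  intro n _
  have hA : printFibb n = (List.range n.toNat).map (fun i => (Nat.fib (1 + i) : Int)) := by
    have := seqF_fib n.toNat 0
    norm_num at this
    rw [printFibb, printFibbLoop_eq, List.nil_append, this]
  have hB : printFibb_alt n = (List.range n.toNat).map (fun i => (Nat.fib (1 + i) : Int)) := by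
    unfold printFibb_alt
    rw [PySem.List.pyRange_one, List.map_map]
    have hlen : (n + 1 - 1).toNat = n.toNat := by omega
    rw [hlen]
    refine List.map_congr_left fun i hi => ?_
    simp only [Function.comp]
    have ht : ((1 : Int) + (i : Nat)).toNat = 1 + i := by omega
    rw [ht, fdN_eq]
  rw [hA, hB]
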